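-- pv_equiv track=rewrite | github.com/praveenkumar3117/RISC-V-Simulation | Phase2.py | findnegative
-- ===== SOURCE A (Python) =====
-- def findnegative(
--                  string):  # Pratima_Singh 2018CEB1021 function to get the sign extended value of a negative imm field
--     length = len(string)
--     neg = -1  # intialize neg with -1
--     sum = 0
--     i = 0  # counter
--     while i <= length - 1:
--         if (string[i] == '0'):
--             sum += -pow(2, i)
--         i = i + 1
--     neg = neg + sum
--     return neg
-- ===== SOURCE B (Python) =====
-- def findnegative(string):
--     # Horner's method LSB-first: value of the bit string minus 2^len gives the
--     # same result A computes by summing -2^i over the zero bits.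
--     value = 0
--     for c in reversed(string):
--         value = 2 * value + (c != '0')
--     return value - (1 << len(string))
-- ===== Notes on version B (the rewrite author's own statement) =====
-- stated objective: alternative
-- what changed: B replaces A's per-index loop that accumulates -pow(2,i) over zero bits with a reversed-traversal Horner evaluation of the bit string followed by a single subtraction of 2^len.
import Mathlib
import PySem

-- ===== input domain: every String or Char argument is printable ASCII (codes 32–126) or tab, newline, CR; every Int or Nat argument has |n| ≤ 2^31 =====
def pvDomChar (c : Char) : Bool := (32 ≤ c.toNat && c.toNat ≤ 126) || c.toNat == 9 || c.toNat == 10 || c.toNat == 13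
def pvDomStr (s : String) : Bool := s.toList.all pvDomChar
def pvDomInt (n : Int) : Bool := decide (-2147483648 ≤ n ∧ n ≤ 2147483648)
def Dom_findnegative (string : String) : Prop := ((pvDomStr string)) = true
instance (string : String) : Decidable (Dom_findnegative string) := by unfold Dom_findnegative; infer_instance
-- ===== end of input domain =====

-- B replaces A's index loop summing -2^i over '0' bits by a reversed-order Horner
-- evaluation of the bit string followed by subtracting 2^len (objective: alternative).

-- ===== PORT A =====
-- while i <= length-1: inspect string[i]; ported as a fold over the indexed characters
def findnegative (string : String) : Int :=
  let sum : Int := (PySem.List.enumerate string.toList 0).foldl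
      (fun sum p => if p.2 = '0' then sum + -((2 : Int) ^ p.1.toNat) else sum) 0
  let neg : Int := -1
  neg + sum

-- ===== PORT B =====
def findnegative_alt (string : String) : Int :=
  let value : Int := string.toList.reverse.foldl
      (fun v c => 2 * v + (if c ≠ '0' then 1 else 0)) 0
  value - 2 ^ string.toList.length

-- ===== PRECONDITION & SPEC =====
def Spec_findnegative (string : String) (out : Int) : Prop := out = findnegative_alt string
instance (string : String) (out : Int) : Decidable (Spec_findnegative string out) := by unfold Spec_findnegative; infer_instance

-- ===== CLAIM (what is proved, stated in full; the proofs are below) =====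
def Claim_equal_findnegative : Prop := ∀ (string : String), Dom_findnegative string → Spec_findnegative string (findnegative string)

-- ===== LEMMAS AND PROOFS =====

/-- Sum of 2^i over the '0'-positions of the list (weights relative, LSB first). -/
def zeroWeight : List Char → Int
  | [] => 0
  | c :: t => (if c = '0' then 1 else 0) + 2 * zeroWeight t

lemma foldA_enumerate (cs : List Char) (n : Nat) (acc : Int) :
    (PySem.List.enumerate cs (n : Int)).foldl
        (fun sum p => if p.2 = '0' then sum + -((2 : Int) ^ p.1.toNat) else sum) acc
      = acc - 2 ^ n * zeroWeight cs := by
  induction cs generalizing n acc with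
  | nil => simp [PySem.List.enumerate_nil, zeroWeight]
  | cons c t ih =>
    rw [PySem.List.enumerate_cons]
    simp only [List.foldl_cons]
    have h1 : ((n : Int) + 1) = ((n + 1 : Nat) : Int) := by push_cast; ring
    rw [h1, ih]
    simp only [Int.toNat_natCast, zeroWeight]
    split_ifs <;> ring

lemma horner_cons (c : Char) (t : List Char) :
    ((c :: t).reverse.foldl (fun v x => 2 * v + (if x ≠ '0' then 1 else 0)) 0 : Int)
      = 2 * (t.reverse.foldl (fun v x => 2 * v + (if x ≠ '0' then 1 else 0)) 0) +
        (if c ≠ '0' then 1 else 0) := by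
  rw [List.reverse_cons, List.foldl_append]
  simp

lemma key (cs : List Char) :
    (-1 : Int) - zeroWeight cs
      = cs.reverse.foldl (fun v x => 2 * v + (if x ≠ '0' then 1 else 0)) 0
        - 2 ^ cs.length := by
  induction cs with
  | nil => simp [zeroWeight]
  | cons c t ih =>
    rw [horner_cons, zeroWeight, List.length_cons]
    have h : (t.reverse.foldl (fun v x => 2 * v + (if x ≠ '0' then 1 else 0)) 0 : Int)
        = 2 ^ t.length + (-1 - zeroWeight t) := by
      rw [ih]; ring
    rw [h, pow_succ]
    by_cases hc : c = '0' <;> simp [hc] <;> ring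

-- ===== VERDICT (by name: the statement is the Claim_ definition above) =====
theorem findnegative_spec : Claim_equal_findnegative := by
  intro string _
  unfold Spec_findnegative findnegative findnegative_alt
  have h0 : ((0 : Int)) = ((0 : Nat) : Int) := by norm_num
  rw [h0, foldA_enumerate]
  have := key string.toList
  simp only [pow_zero, Nat.cast_zero]
  omega
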